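-- pv_equiv track=rewrite | github.com/MintCider/beadify | beadify.py | _rasterize_4connected
-- ===== SOURCE A (Python) =====
-- def _rasterize_4connected(r1: int, c1: int, r2: int, c2: int) -> list[tuple[int, int]]:
--     """Rasterize a line as 4-connected grid cells (Bresenham variant).
--
--     Every consecutive pair of cells shares an edge (not just a corner).
--     Total steps = |dr| + |dc|.
--     """
--     path = [(r1, c1)]
--     dr = abs(r2 - r1)
--     dc = abs(c2 - c1)
--     sr = 1 if r2 > r1 else (-1 if r2 < r1 else 0)
--     sc = 1 if c2 > c1 else (-1 if c2 < c1 else 0)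
--     r, c = r1, c1
--
--     if dc >= dr:
--         err = dc // 2
--         for _ in range(dc):
--             err -= dr
--             if err < 0:
--                 r += sr
--                 path.append((r, c))
--                 err += dc
--             c += sc
--             path.append((r, c))
--     else:
--         err = dr // 2
--         for _ in range(dr):
--             err -= dc
--             if err < 0:
--                 c += sc
--                 path.append((r, c))
--                 err += dr
--             r += sr
--             path.append((r, c))
--     return path
-- ===== SOURCE B (Python) =====
-- def _rasterize_4connected(r1: int, c1: int, r2: int, c2: int) -> list[tuple[int, int]]:
--     """Rasterize a line as 4-connected grid cells, computing each cell from a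
--     closed-form rounded-division count instead of a running error accumulator."""
--     dr = abs(r2 - r1)
--     dc = abs(c2 - c1)
--     sr = (r2 > r1) - (r2 < r1)
--     sc = (c2 > c1) - (c2 < c1)
--     path = [(r1, c1)]
--     if dc >= dr:
--         prev = 0
--         for i in range(1, dc + 1):
--             cnt = (dr * i + (dc - 1) // 2) // dc
--             if cnt > prev:
--                 path.append((r1 + sr * cnt, c1 + sc * (i - 1)))
--             path.append((r1 + sr * cnt, c1 + sc * i))
--             prev = cnt
--     else:
--         prev = 0
--         for i in range(1, dr + 1):
--             cnt = (dc * i + (dr - 1) // 2) // dr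
--             if cnt > prev:
--                 path.append((r1 + sr * (i - 1), c1 + sc * cnt))
--             path.append((r1 + sr * i, c1 + sc * cnt))
--             prev = cnt
--     return path
-- ===== Notes on version B (the rewrite author's own statement) =====
-- stated objective: alternative
-- what changed: Replaces Bresenham's running error accumulator with a closed-form floor-division count (dr*i + (dc-1)//2)//dc of minor-axis steps computed independently at each iteration, appending cells straight from r1/c1 plus scaled offsets instead of mutating r, c and err.
import Mathlib
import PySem

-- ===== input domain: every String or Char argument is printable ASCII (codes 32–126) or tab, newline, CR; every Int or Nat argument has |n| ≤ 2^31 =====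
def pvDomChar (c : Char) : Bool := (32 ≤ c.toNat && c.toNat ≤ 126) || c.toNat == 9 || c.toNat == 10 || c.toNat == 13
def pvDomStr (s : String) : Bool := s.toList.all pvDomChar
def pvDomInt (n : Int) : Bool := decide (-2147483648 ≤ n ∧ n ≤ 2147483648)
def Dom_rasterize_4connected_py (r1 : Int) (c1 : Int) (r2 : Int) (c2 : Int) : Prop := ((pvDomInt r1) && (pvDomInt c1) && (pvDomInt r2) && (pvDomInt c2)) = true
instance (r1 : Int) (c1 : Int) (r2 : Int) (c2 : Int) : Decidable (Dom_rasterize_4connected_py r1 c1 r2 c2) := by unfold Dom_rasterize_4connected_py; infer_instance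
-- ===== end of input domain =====

-- B replaces A's running Bresenham error accumulator with a per-iteration closed-form
-- floor-division step count (objective: alternative decomposition, comparable cost).

-- ===== PORT A =====
-- A's 'if dc >= dr' loop: state (err, r, c, path), one recursive call per range step
def pvLoopA1 (dr dc sr sc : Int) : Nat → Int → Int → Int → List (Int × Int) → List (Int × Int)
  | 0, _, _, _, path => path
  | n + 1, err, r, c, path =>
    let err1 := err - dr
    if err1 < 0 then
      pvLoopA1 dr dc sr sc n (err1 + dc) (r + sr) (c + sc)
        ((path ++ [(r + sr, c)]) ++ [(r + sr, c + sc)])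
    else
      pvLoopA1 dr dc sr sc n err1 r (c + sc) (path ++ [(r, c + sc)])

-- A's 'else' loop
def pvLoopA2 (dr dc sr sc : Int) : Nat → Int → Int → Int → List (Int × Int) → List (Int × Int)
  | 0, _, _, _, path => path
  | n + 1, err, r, c, path =>
    let err1 := err - dc
    if err1 < 0 then
      pvLoopA2 dr dc sr sc n (err1 + dr) (r + sr) (c + sc)
        ((path ++ [(r, c + sc)]) ++ [(r + sr, c + sc)])
    else
      pvLoopA2 dr dc sr sc n err1 (r + sr) c (path ++ [(r + sr, c)])

def rasterize_4connected_py (r1 : Int) (c1 : Int) (r2 : Int) (c2 : Int) : List (Int × Int) :=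
  let dr := |r2 - r1|
  let dc := |c2 - c1|
  let sr : Int := if r2 > r1 then 1 else if r2 < r1 then -1 else 0
  let sc : Int := if c2 > c1 then 1 else if c2 < c1 then -1 else 0
  if dc ≥ dr then
    pvLoopA1 dr dc sr sc dc.toNat (PySem.Int.floordiv dc 2) r1 c1 [(r1, c1)]
  else
    pvLoopA2 dr dc sr sc dr.toNat (PySem.Int.floordiv dr 2) r1 c1 [(r1, c1)]

-- ===== PORT B =====
-- B's first loop: i runs 1..dc; cnt is the closed-form count of r-steps after i columns
def pvLoopB1 (r1 c1 dr dc sr sc : Int) : Nat → Int → Int → List (Int × Int) → List (Int × Int)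
  | 0, _, _, path => path
  | n + 1, i, prev, path =>
    let cnt := PySem.Int.floordiv (dr * i + PySem.Int.floordiv (dc - 1) 2) dc
    let path1 := if cnt > prev then path ++ [(r1 + sr * cnt, c1 + sc * (i - 1))] else path
    pvLoopB1 r1 c1 dr dc sr sc n (i + 1) cnt (path1 ++ [(r1 + sr * cnt, c1 + sc * i)])

-- B's second loop
def pvLoopB2 (r1 c1 dr dc sr sc : Int) : Nat → Int → Int → List (Int × Int) → List (Int × Int)
  | 0, _, _, path => path
  | n + 1, i, prev, path =>
    let cnt := PySem.Int.floordiv (dc * i + PySem.Int.floordiv (dr - 1) 2) dr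
    let path1 := if cnt > prev then path ++ [(r1 + sr * (i - 1), c1 + sc * cnt)] else path
    pvLoopB2 r1 c1 dr dc sr sc n (i + 1) cnt (path1 ++ [(r1 + sr * i, c1 + sc * cnt)])

def rasterize_4connected_py_alt (r1 : Int) (c1 : Int) (r2 : Int) (c2 : Int) : List (Int × Int) :=
  let dr := |r2 - r1|
  let dc := |c2 - c1|
  let sr : Int := if r2 > r1 then 1 else if r2 < r1 then -1 else 0
  let sc : Int := if c2 > c1 then 1 else if c2 < c1 then -1 else 0
  if dc ≥ dr then
    pvLoopB1 r1 c1 dr dc sr sc dc.toNat 1 0 [(r1, c1)]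
  else
    pvLoopB2 r1 c1 dr dc sr sc dr.toNat 1 0 [(r1, c1)]

-- ===== PRECONDITION & SPEC =====
def Spec_rasterize_4connected_py (r1 : Int) (c1 : Int) (r2 : Int) (c2 : Int) (out : List (Int × Int)) : Prop := out = rasterize_4connected_py_alt r1 c1 r2 c2
instance (r1 : Int) (c1 : Int) (r2 : Int) (c2 : Int) (out : List (Int × Int)) : Decidable (Spec_rasterize_4connected_py r1 c1 r2 c2 out) := by unfold Spec_rasterize_4connected_py; infer_instance

-- ===== CLAIM (what is proved, stated in full; the proofs are below) =====
def Claim_equal_rasterize_4connected_py : Prop := ∀ (r1 : Int) (c1 : Int) (r2 : Int) (c2 : Int), Dom_rasterize_4connected_py r1 c1 r2 c2 → Spec_rasterize_4connected_py r1 c1 r2 c2 (rasterize_4connected_py r1 c1 r2 c2)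

-- ===== LEMMAS AND PROOFS =====

-- Loop equivalence, first branch: after j iterations A's state is determined by the
-- closed-form count k = (dr*j + (dc-1)//2) // dc, characterised by its bracket bounds.
lemma pvLoop1_eq (dr dc sr sc a1 b1 : Int) (hdr : 0 ≤ dr) (hdc : dr ≤ dc) (hpos : 0 < dc) :
    ∀ (n : Nat) (j k : Int) (path : List (Int × Int)),
      k * dc ≤ dr * j + PySem.Int.floordiv (dc - 1) 2 →
      dr * j + PySem.Int.floordiv (dc - 1) 2 < (k + 1) * dc →
      pvLoopA1 dr dc sr sc n (PySem.Int.floordiv dc 2 - dr * j + dc * k) (a1 + sr * k) (b1 + sc * j) path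
        = pvLoopB1 a1 b1 dr dc sr sc n (j + 1) k path := by
  intro n
  induction n with
  | zero => intro j k path _ _; rfl
  | succ n ih =>
    intro j k path hlo hhi
    obtain ⟨h2a, h2b⟩ : (PySem.Int.floordiv dc 2) * 2 ≤ dc ∧ dc < (PySem.Int.floordiv dc 2 + 1) * 2 :=
      (PySem.Int.floordiv_eq_iff_of_pos (by norm_num)).mp rfl
    obtain ⟨e2a, e2b⟩ : (PySem.Int.floordiv (dc-1) 2) * 2 ≤ dc - 1 ∧ dc - 1 < (PySem.Int.floordiv (dc-1) 2 + 1) * 2 :=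
      (PySem.Int.floordiv_eq_iff_of_pos (by norm_num)).mp rfl
    simp only [pvLoopA1, pvLoopB1]
    set h := PySem.Int.floordiv dc 2 with hh
    set e := PySem.Int.floordiv (dc - 1) 2 with he
    clear_value h e
    have hhe : h + e = dc - 1 := by omega
    by_cases hc : h - dr * j + dc * k - dr < 0
    · have hb1 : (k + 1) * dc ≤ dr * (j + 1) + e := by nlinarith [hc, hhe]
      have hb2 : dr * (j + 1) + e < (k + 2) * dc := by nlinarith [hhi, hdc]
      have hk' : PySem.Int.floordiv (dr * (j + 1) + e) dc = k + 1 :=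
        (PySem.Int.floordiv_eq_iff_of_pos hpos).mpr ⟨hb1, by nlinarith [hb2]⟩
      rw [if_pos hc, hk', if_pos (by omega : k + 1 > k)]
      have q1 : a1 + sr * k + sr = a1 + sr * (k + 1) := by ring
      have q2 : b1 + sc * (j + 1 - 1) = b1 + sc * j := by ring
      have q3 : b1 + sc * j + sc = b1 + sc * (j + 1) := by ring
      have q4 : h - dr * j + dc * k - dr + dc = h - dr * (j + 1) + dc * (k + 1) := by ring
      rw [q1, q2, q3, q4]
      exact ih (j + 1) (k + 1) _ hb1 (by nlinarith [hb2])
    · have hb1 : k * dc ≤ dr * (j + 1) + e := by nlinarith [hlo, hdr]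
      have hb2 : dr * (j + 1) + e < (k + 1) * dc := by nlinarith [hc, hhe]
      have hk' : PySem.Int.floordiv (dr * (j + 1) + e) dc = k :=
        (PySem.Int.floordiv_eq_iff_of_pos hpos).mpr ⟨hb1, hb2⟩
      rw [if_neg hc, hk', if_neg (by omega : ¬ k > k)]
      have q3 : b1 + sc * j + sc = b1 + sc * (j + 1) := by ring
      have q4 : h - dr * j + dc * k - dr = h - dr * (j + 1) + dc * k := by ring
      rw [q3, q4]
      exact ih (j + 1) k _ hb1 hb2

-- Loop equivalence, second branch (roles of the axes swapped).
lemma pvLoop2_eq (dr dc sr sc a1 b1 : Int) (hdc : 0 ≤ dc) (hdr : dc ≤ dr) (hpos : 0 < dr) :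
    ∀ (n : Nat) (j k : Int) (path : List (Int × Int)),
      k * dr ≤ dc * j + PySem.Int.floordiv (dr - 1) 2 →
      dc * j + PySem.Int.floordiv (dr - 1) 2 < (k + 1) * dr →
      pvLoopA2 dr dc sr sc n (PySem.Int.floordiv dr 2 - dc * j + dr * k) (a1 + sr * j) (b1 + sc * k) path
        = pvLoopB2 a1 b1 dr dc sr sc n (j + 1) k path := by
  intro n
  induction n with
  | zero => intro j k path _ _; rfl
  | succ n ih =>
    intro j k path hlo hhi
    obtain ⟨h2a, h2b⟩ : (PySem.Int.floordiv dr 2) * 2 ≤ dr ∧ dr < (PySem.Int.floordiv dr 2 + 1) * 2 :=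
      (PySem.Int.floordiv_eq_iff_of_pos (by norm_num)).mp rfl
    obtain ⟨e2a, e2b⟩ : (PySem.Int.floordiv (dr-1) 2) * 2 ≤ dr - 1 ∧ dr - 1 < (PySem.Int.floordiv (dr-1) 2 + 1) * 2 :=
      (PySem.Int.floordiv_eq_iff_of_pos (by norm_num)).mp rfl
    simp only [pvLoopA2, pvLoopB2]
    set h := PySem.Int.floordiv dr 2 with hh
    set e := PySem.Int.floordiv (dr - 1) 2 with he
    clear_value h e
    have hhe : h + e = dr - 1 := by omega
    by_cases hc : h - dc * j + dr * k - dc < 0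
    · have hb1 : (k + 1) * dr ≤ dc * (j + 1) + e := by nlinarith [hc, hhe]
      have hb2 : dc * (j + 1) + e < (k + 2) * dr := by nlinarith [hhi, hdr]
      have hk' : PySem.Int.floordiv (dc * (j + 1) + e) dr = k + 1 :=
        (PySem.Int.floordiv_eq_iff_of_pos hpos).mpr ⟨hb1, by nlinarith [hb2]⟩
      rw [if_pos hc, hk', if_pos (by omega : k + 1 > k)]
      have q1 : b1 + sc * k + sc = b1 + sc * (k + 1) := by ring
      have q2 : a1 + sr * (j + 1 - 1) = a1 + sr * j := by ring
      have q3 : a1 + sr * j + sr = a1 + sr * (j + 1) := by ring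
      have q4 : h - dc * j + dr * k - dc + dr = h - dc * (j + 1) + dr * (k + 1) := by ring
      rw [q1, q2, q3, q4]
      exact ih (j + 1) (k + 1) _ hb1 (by nlinarith [hb2])
    · have hb1 : k * dr ≤ dc * (j + 1) + e := by nlinarith [hlo, hdc]
      have hb2 : dc * (j + 1) + e < (k + 1) * dr := by nlinarith [hc, hhe]
      have hk' : PySem.Int.floordiv (dc * (j + 1) + e) dr = k :=
        (PySem.Int.floordiv_eq_iff_of_pos hpos).mpr ⟨hb1, hb2⟩
      rw [if_neg hc, hk', if_neg (by omega : ¬ k > k)]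
      have q3 : a1 + sr * j + sr = a1 + sr * (j + 1) := by ring
      have q4 : h - dc * j + dr * k - dc = h - dc * (j + 1) + dr * k := by ring
      rw [q3, q4]
      exact ih (j + 1) k _ hb1 hb2

-- Entry of the first branch (handles dc = 0 separately; otherwise instantiates j = k = 0).
lemma pvBranch1_eq (dr dc sr sc a1 b1 : Int) (hdr : 0 ≤ dr) (hdc : dr ≤ dc) :
    pvLoopA1 dr dc sr sc dc.toNat (PySem.Int.floordiv dc 2) a1 b1 [(a1, b1)]
      = pvLoopB1 a1 b1 dr dc sr sc dc.toNat 1 0 [(a1, b1)] := by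
  rcases eq_or_lt_of_le (le_trans hdr hdc) with h0 | hpos
  · rw [← h0]; rfl
  · obtain ⟨e2a, e2b⟩ : (PySem.Int.floordiv (dc-1) 2) * 2 ≤ dc - 1 ∧ dc - 1 < (PySem.Int.floordiv (dc-1) 2 + 1) * 2 :=
      (PySem.Int.floordiv_eq_iff_of_pos (by norm_num)).mp rfl
    have := pvLoop1_eq dr dc sr sc a1 b1 hdr hdc hpos dc.toNat 0 0 [(a1, b1)]
      (by nlinarith [e2a, e2b]) (by nlinarith [e2a, e2b])
    simpa using this

-- Entry of the second branch.
lemma pvBranch2_eq (dr dc sr sc a1 b1 : Int) (hdc : 0 ≤ dc) (hdr : dc ≤ dr) (hpos : 0 < dr) :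
    pvLoopA2 dr dc sr sc dr.toNat (PySem.Int.floordiv dr 2) a1 b1 [(a1, b1)]
      = pvLoopB2 a1 b1 dr dc sr sc dr.toNat 1 0 [(a1, b1)] := by
  obtain ⟨e2a, e2b⟩ : (PySem.Int.floordiv (dr-1) 2) * 2 ≤ dr - 1 ∧ dr - 1 < (PySem.Int.floordiv (dr-1) 2 + 1) * 2 :=
    (PySem.Int.floordiv_eq_iff_of_pos (by norm_num)).mp rfl
  have := pvLoop2_eq dr dc sr sc a1 b1 hdc hdr hpos dr.toNat 0 0 [(a1, b1)]
    (by nlinarith [e2a, e2b]) (by nlinarith [e2a, e2b])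
  simpa using this

-- ===== VERDICT (by name: the statement is the Claim_ definition above) =====
theorem rasterize_4connected_py_spec : Claim_equal_rasterize_4connected_py := by
  intro r1 c1 r2 c2 _
  unfold Spec_rasterize_4connected_py rasterize_4connected_py rasterize_4connected_py_alt
  simp only
  by_cases hbr : |c2 - c1| ≥ |r2 - r1|
  · rw [if_pos hbr, if_pos hbr]
    exact pvBranch1_eq _ _ _ _ _ _ (abs_nonneg _) hbr
  · rw [if_neg hbr, if_neg hbr]
    exact pvBranch2_eq _ _ _ _ _ _ (abs_nonneg _) (by omega) (by have := abs_nonneg (c2 - c1); omega)
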